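-- pv_equiv track=rewrite | github.com/psligti/ash-hawk | ash_hawk/pipeline/coach.py | _risk_from_signal_mix
-- ===== SOURCE A (Python) =====
-- from typing import TYPE_CHECKING, Literal, Mapping, cast
--
-- def _risk_from_signal_mix(
--     evidence: list[dict[str, str]]
-- ) -> Literal["low", "medium", "high"]:
--     combined = " ".join(signal["text"].lower() for signal in evidence)
--     if "permission" in combined or "critical" in combined:
--         return "high"
--     if "timeout" in combined or "failed" in combined or "error" in combined:
--         return "medium"
--     return "low"
-- ===== SOURCE B (Python) =====
-- def _risk_from_signal_mix(evidence):
--     found_medium = False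
--     for sig in evidence:
--         text = sig["text"].lower()
--         if "permission" in text or "critical" in text:
--             return "high"
--         if "timeout" in text or "failed" in text or "error" in text:
--             found_medium = True
--     return "medium" if found_medium else "low"
-- ===== Notes on version B (the rewrite author's own statement) =====
-- stated objective: alternative
-- what changed: Instead of concatenating all lowered texts into one joined string and scanning it, B makes a single pass over the signals, short-circuiting with an early return on a high keyword and carrying a found_medium flag; no combined string is ever built.
import Mathlib
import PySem

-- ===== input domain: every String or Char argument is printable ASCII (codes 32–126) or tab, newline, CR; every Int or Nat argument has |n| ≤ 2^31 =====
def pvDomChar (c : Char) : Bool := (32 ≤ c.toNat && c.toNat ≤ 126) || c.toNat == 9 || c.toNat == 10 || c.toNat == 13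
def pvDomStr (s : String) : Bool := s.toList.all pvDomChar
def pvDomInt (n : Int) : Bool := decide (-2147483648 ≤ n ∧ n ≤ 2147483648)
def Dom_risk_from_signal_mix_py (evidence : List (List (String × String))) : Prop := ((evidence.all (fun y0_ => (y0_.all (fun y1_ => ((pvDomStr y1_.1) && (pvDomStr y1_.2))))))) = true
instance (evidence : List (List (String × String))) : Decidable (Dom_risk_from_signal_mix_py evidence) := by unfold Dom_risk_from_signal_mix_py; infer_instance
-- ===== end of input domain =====

-- B replaces A's joined lowercased string with a single pass over the signals
-- (early return on a high keyword, a found_medium flag otherwise); same return value.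

-- shared helper: signal["text"].lower()  (Pre_ guarantees the key is present)
def pvText (signal : List (String × String)) : String :=
  PySem.Str.lower (((PySem.Dict.mk signal).get? "text").getD "")

-- ===== PORT A =====
def risk_from_signal_mix_py (evidence : List (List (String × String))) : String :=
  let combined := PySem.Str.join " " (evidence.map (fun signal => pvText signal))
  if PySem.Str.isIn "permission" combined || PySem.Str.isIn "critical" combined then "high"
  else if PySem.Str.isIn "timeout" combined || PySem.Str.isIn "failed" combined || PySem.Str.isIn "error" combined then "medium"
  else "low"

-- ===== PORT B =====
def pvAltLoop : List (List (String × String)) → Bool → String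
  | [], foundMedium => if foundMedium then "medium" else "low"
  | signal :: rest, foundMedium =>
    let t := pvText signal
    if PySem.Str.isIn "permission" t || PySem.Str.isIn "critical" t then "high"
    else pvAltLoop rest (foundMedium || (PySem.Str.isIn "timeout" t || PySem.Str.isIn "failed" t || PySem.Str.isIn "error" t))

def risk_from_signal_mix_py_alt (evidence : List (List (String × String))) : String :=
  pvAltLoop evidence false

-- ===== PRECONDITION & SPEC =====
-- Pre_ excludes exactly the inputs where Python A raises KeyError: a signal dict without a "text" key.
def Pre_risk_from_signal_mix_py (evidence : List (List (String × String))) : Prop :=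
  ∀ signal ∈ evidence, (PySem.Dict.mk signal).contains "text" = true
instance (evidence : List (List (String × String))) : Decidable (Pre_risk_from_signal_mix_py evidence) := by unfold Pre_risk_from_signal_mix_py; infer_instance
def pvWitness_risk_from_signal_mix_py : (List (List (String × String))) := [[("text", "all ok")], [("text", "Timeout seen")]]

def Spec_risk_from_signal_mix_py (evidence : List (List (String × String))) (out : String) : Prop := out = risk_from_signal_mix_py_alt evidence
instance (evidence : List (List (String × String))) (out : String) : Decidable (Spec_risk_from_signal_mix_py evidence out) := by unfold Spec_risk_from_signal_mix_py; infer_instance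

-- ===== CLAIM (what is proved, stated in full; the proofs are below) =====
def Claim_equal_risk_from_signal_mix_py : Prop := ∀ (evidence : List (List (String × String))), Dom_risk_from_signal_mix_py evidence → Pre_risk_from_signal_mix_py evidence → Spec_risk_from_signal_mix_py evidence (risk_from_signal_mix_py evidence)

-- ===== LEMMAS AND PROOFS =====

-- a separator-free pattern is a prefix of cs ++ ' ' :: ds iff it is a prefix of cs
lemma prefix_append_sep {sub : List Char} (hs : ' ' ∉ sub) :
    ∀ cs ds : List Char, (sub <+: cs ++ ' ' :: ds ↔ sub <+: cs) := by
  induction sub with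
  | nil => intro cs ds; simp
  | cons a sub' ih =>
    intro cs ds
    have ha : a ≠ ' ' := fun h => hs (h ▸ List.mem_cons_self)
    have hs' : ' ' ∉ sub' := fun h => hs (List.mem_cons_of_mem _ h)
    cases cs with
    | nil =>
      simp only [List.nil_append, List.cons_prefix_cons]
      constructor
      · rintro ⟨h, -⟩; exact absurd h ha
      · intro h; simp at h
    | cons c cs' =>
      simp only [List.cons_append, List.cons_prefix_cons]
      exact and_congr_right fun _ => ih hs' cs' ds

-- a separator-free pattern is an infix of cs ++ ' ' :: ds iff it is an infix of one side
lemma infix_append_sep {sub : List Char} (hs : ' ' ∉ sub) :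
    ∀ cs ds : List Char, (sub <:+: cs ++ ' ' :: ds ↔ sub <:+: cs ∨ sub <:+: ds) := by
  intro cs
  induction cs with
  | nil =>
    intro ds
    have h := prefix_append_sep hs [] ds
    simp only [List.nil_append] at h
    rw [List.nil_append, List.infix_cons_iff, h]
    simp
  | cons c cs' ih =>
    intro ds
    have h := prefix_append_sep hs (c :: cs') ds
    simp only [List.cons_append] at h
    rw [List.cons_append, List.infix_cons_iff, ih ds, h, List.infix_cons_iff]
    tauto

-- substring of the space-join = substring of some element (for a nonempty, space-free pattern)
lemma isIn_join_space {sub : List Char} (hne : sub ≠ []) (hs : ' ' ∉ sub) :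
    ∀ ts : List (List Char),
      PySem.Chars.isIn sub (PySem.Chars.join [' '] ts) = ts.any (fun t => PySem.Chars.isIn sub t) := by
  intro ts
  induction ts with
  | nil =>
    simp only [PySem.Chars.join_nil, List.any_nil]
    rw [PySem.Chars.isIn_eq_false_iff]
    intro h
    exact hne (List.eq_nil_of_infix_nil h)
  | cons t ts' ih =>
    cases ts' with
    | nil => simp [PySem.Chars.join_singleton]
    | cons t' ts'' =>
      rw [PySem.Chars.join_cons_cons, List.any_cons]
      have : t ++ [' '] ++ PySem.Chars.join [' '] (t' :: ts'')
          = t ++ ' ' :: PySem.Chars.join [' '] (t' :: ts'') := by simp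
      rw [this]
      rcases h1 : PySem.Chars.isIn sub t with _ | _
      · rcases h2 : PySem.Chars.isIn sub (PySem.Chars.join [' '] (t' :: ts'')) with _ | _
        · rw [← ih, h2]
          simp only [Bool.false_or]
          rw [PySem.Chars.isIn_eq_false_iff, infix_append_sep hs]
          rw [PySem.Chars.isIn_eq_false_iff] at h1 h2
          tauto
        · rw [← ih, h2]
          simp only [Bool.false_or]
          rw [PySem.Chars.isIn_iff_infix, infix_append_sep hs]
          rw [PySem.Chars.isIn_iff_infix] at h2
          tauto
      · simp only [Bool.true_or]
        rw [PySem.Chars.isIn_iff_infix, infix_append_sep hs]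
        rw [PySem.Chars.isIn_iff_infix] at h1
        tauto

-- lift to String-level isIn over Str.join " "
lemma str_isIn_join (sub : String) (hne : sub.toList ≠ []) (hs : ' ' ∉ sub.toList)
    (parts : List String) :
    PySem.Str.isIn sub (PySem.Str.join " " parts)
      = parts.any (fun t => PySem.Str.isIn sub t) := by
  have h := isIn_join_space hne hs (parts.map String.toList)
  simp only [PySem.Str.isIn, PySem.Str.toList_join] at *
  have : " ".toList = [' '] := rfl
  rw [this, h, List.any_map]
  rfl

-- any over a pointwise disjunction splits (no library lemma matched)
lemma any_orb {α : Type} (l : List α) (p q : α → Bool) :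
    l.any (fun x => p x || q x) = (l.any p || l.any q) := by
  induction l with
  | nil => rfl
  | cons a l ih => simp only [List.any_cons, ih]; cases p a <;> cases q a <;> simp

def pvHi (t : String) : Bool := PySem.Str.isIn "permission" t || PySem.Str.isIn "critical" t
def pvMed (t : String) : Bool :=
  PySem.Str.isIn "timeout" t || PySem.Str.isIn "failed" t || PySem.Str.isIn "error" t

lemma A_char (evidence : List (List (String × String))) :
    risk_from_signal_mix_py evidence
      = (if evidence.any (fun s => pvHi (pvText s)) then "high"
         else if evidence.any (fun s => pvMed (pvText s)) then "medium" else "low") := by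
  unfold risk_from_signal_mix_py
  simp only []
  rw [str_isIn_join "permission" (by decide) (by decide),
      str_isIn_join "critical" (by decide) (by decide),
      str_isIn_join "timeout" (by decide) (by decide),
      str_isIn_join "failed" (by decide) (by decide),
      str_isIn_join "error" (by decide) (by decide)]
  simp only [List.any_map, Function.comp_def]
  unfold pvHi pvMed
  rw [any_orb, any_orb, any_orb]

lemma B_char (evidence : List (List (String × String))) (m : Bool) :
    pvAltLoop evidence m
      = (if evidence.any (fun s => pvHi (pvText s)) then "high"
         else if m || evidence.any (fun s => pvMed (pvText s)) then "medium" else "low") := by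
  induction evidence generalizing m with
  | nil => simp [pvAltLoop]
  | cons s rest ih =>
    simp only [pvAltLoop, List.any_cons]
    rcases h1 : pvHi (pvText s) with _ | _
    · rw [ih]
      rcases h2 : rest.any (fun s => pvHi (pvText s)) with _ | _
      · unfold pvHi at h1
        rw [h1]
        simp only [Bool.false_or]
        unfold pvMed
        cases m <;> cases h3 : pvMed (pvText s) <;> unfold pvMed at h3 <;> simp_all
      · unfold pvHi at h1; rw [h1]; simp
    · unfold pvHi at h1; rw [h1]; simp

-- ===== VERDICT (by name: the statement is the Claim_ definition above) =====
theorem risk_from_signal_mix_py_spec : Claim_equal_risk_from_signal_mix_py := by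
  intro evidence _hDom _hPre
  unfold Spec_risk_from_signal_mix_py risk_from_signal_mix_py_alt
  rw [A_char, B_char]
  simp
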